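-- pv_equiv track=rewrite | github.com/LouisRossouw/portfolio_website | portfolio/functions.py | calculate_columns
-- ===== SOURCE A (Python) =====
-- def calculate_columns(dict):
--     """ This function chooses a specific .css class based on if there content in the projects additional images directories /
--         based off that data, it will generate a column for the specific column if there is content. """
--
--     count = []
--
--     for k, i in dict.items():
--         if i != False:
--             count.append(i)
--
--     count_length = len(count)
--
--     # Need to clean this up and make it more simple.
--
--     if count_length == 0 or count_length == 1:
--         column_1 = "portfolio_detail_TEXT_DYNAMIC_LENGTH_1"
--         column_2 = "portfolio_detail_MYSHOTS_DYNAMIC_LENGTH_1"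
--         column_3 = "portfolio_detail_RAW_DYNAMIC_LENGTH_1"
--         column_4 = "portfolio_detail_BREAKDOWN_DYNAMIC_LENGTH_1"
--
--     if count_length == 2:
--         column_1 = "portfolio_detail_TEXT_DYNAMIC_LENGTH_2"
--         column_2 = "portfolio_detail_MYSHOTS_DYNAMIC_LENGTH_2"
--         column_3 = "portfolio_detail_RAW_DYNAMIC_LENGTH_2"
--         column_4 = "portfolio_detail_BREAKDOWN_DYNAMIC_LENGTH_2"
--
--     if count_length == 3:
--         column_1 = "portfolio_detail_TEXT_DYNAMIC_LENGTH_3"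
--         column_2 = "portfolio_detail_MYSHOTS_DYNAMIC_LENGTH_3"
--         column_3 = "portfolio_detail_RAW_DYNAMIC_LENGTH_3"
--         column_4 = "portfolio_detail_BREAKDOWN_DYNAMIC_LENGTH_3"
--
--     return {"column_1" : column_1, "column_2" : column_2, "column_3" : column_3, "column_4" : column_4}
-- ===== SOURCE B (Python) =====
-- def calculate_columns(dict):
--     # Simpler: one count, one suffix, one table-driven build (replaces A's three
--     # repeated literal-assignment blocks). For 4+ truthy values A raises
--     # UnboundLocalError; B naturally returns the classes with the real count.
--     n = sum(1 for v in dict.values() if v != False)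
--     suffix = "1" if n <= 1 else str(n)
--     names = ["TEXT", "MYSHOTS", "RAW", "BREAKDOWN"]
--     return {f"column_{i}": f"portfolio_detail_{name}_DYNAMIC_LENGTH_{suffix}"
--             for i, name in enumerate(names, start=1)}
-- ===== Notes on version B (the rewrite author's own statement) =====
-- stated objective: simpler
-- what changed: Replaces A's append-loop plus three repeated four-assignment if-blocks by a single count, one computed length suffix, and a table-driven comprehension over the four column prefixes.
import Mathlib
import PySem

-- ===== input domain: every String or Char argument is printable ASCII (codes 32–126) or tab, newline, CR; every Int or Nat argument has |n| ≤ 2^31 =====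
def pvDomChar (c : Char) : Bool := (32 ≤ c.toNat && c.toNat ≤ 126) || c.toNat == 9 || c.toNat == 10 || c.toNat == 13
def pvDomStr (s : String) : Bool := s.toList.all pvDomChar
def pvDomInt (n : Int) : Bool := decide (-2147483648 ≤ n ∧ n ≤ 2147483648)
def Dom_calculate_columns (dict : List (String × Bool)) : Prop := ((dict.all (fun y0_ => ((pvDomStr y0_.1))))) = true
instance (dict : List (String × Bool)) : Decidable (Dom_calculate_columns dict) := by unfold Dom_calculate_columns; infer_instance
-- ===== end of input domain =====

-- B replaces A's three repeated literal-assignment blocks by one count, one computed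
-- length suffix and a table-driven build over the four column prefixes (objective: simpler).


-- ===== PORT A =====
-- Transliteration of A: the unassigned local columns are modelled as Option String
-- starting at none; when count_length ≥ 4 none of the if-blocks fires and Python raises
-- UnboundLocalError — those inputs are excluded by Pre_ ('' stands in for the unbound local).
def calculate_columns (dict : List (String × Bool)) : List (String × String) :=
  let count : List Bool := (PySem.Dict.ofList dict).items.foldl
    (fun acc kv => if kv.2 != false then acc ++ [kv.2] else acc) []
  let count_length := count.length
  let cols : Option String × Option String × Option String × Option String :=
    (none, none, none, none)
  let cols := if count_length = 0 ∨ count_length = 1 then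
    (some "portfolio_detail_TEXT_DYNAMIC_LENGTH_1", some "portfolio_detail_MYSHOTS_DYNAMIC_LENGTH_1",
     some "portfolio_detail_RAW_DYNAMIC_LENGTH_1", some "portfolio_detail_BREAKDOWN_DYNAMIC_LENGTH_1")
    else cols
  let cols := if count_length = 2 then
    (some "portfolio_detail_TEXT_DYNAMIC_LENGTH_2", some "portfolio_detail_MYSHOTS_DYNAMIC_LENGTH_2",
     some "portfolio_detail_RAW_DYNAMIC_LENGTH_2", some "portfolio_detail_BREAKDOWN_DYNAMIC_LENGTH_2")
    else cols
  let cols := if count_length = 3 then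
    (some "portfolio_detail_TEXT_DYNAMIC_LENGTH_3", some "portfolio_detail_MYSHOTS_DYNAMIC_LENGTH_3",
     some "portfolio_detail_RAW_DYNAMIC_LENGTH_3", some "portfolio_detail_BREAKDOWN_DYNAMIC_LENGTH_3")
    else cols
  [("column_1", cols.1.getD ""), ("column_2", cols.2.1.getD ""),
   ("column_3", cols.2.2.1.getD ""), ("column_4", cols.2.2.2.getD "")]

-- ===== PORT B =====
def calculate_columns_alt (dict : List (String × Bool)) : List (String × String) :=
  let n : Int := ((PySem.Dict.ofList dict).values.map (fun v => if v != false then (1 : Int) else 0)).sum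
  let suffix := if n ≤ 1 then "1" else PySem.Int.toStr n
  (PySem.List.enumerate ["TEXT", "MYSHOTS", "RAW", "BREAKDOWN"] 1).map
    (fun p => ("column_" ++ PySem.Int.toStr p.1,
               "portfolio_detail_" ++ p.2 ++ "_DYNAMIC_LENGTH_" ++ suffix))

-- ===== PRECONDITION & SPEC =====
-- Pre_ excludes exactly the inputs with four or more non-False values, on which A
-- raises UnboundLocalError (no if-block assigns the column variables).
def Pre_calculate_columns (dict : List (String × Bool)) : Prop :=
  (PySem.Dict.ofList dict).values.countP (fun v => v != false) ≤ 3
instance (dict : List (String × Bool)) : Decidable (Pre_calculate_columns dict) := by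
  unfold Pre_calculate_columns; infer_instance
def pvWitness_calculate_columns : (List (String × Bool)) := [("a", true), ("b", false)]

def Spec_calculate_columns (dict : List (String × Bool)) (out : List (String × String)) : Prop := out = calculate_columns_alt dict
instance (dict : List (String × Bool)) (out : List (String × String)) : Decidable (Spec_calculate_columns dict out) := by unfold Spec_calculate_columns; infer_instance

-- ===== CLAIM (what is proved, stated in full; the proofs are below) =====
def Claim_equal_calculate_columns : Prop := ∀ (dict : List (String × Bool)), Dom_calculate_columns dict → Pre_calculate_columns dict → Spec_calculate_columns dict (calculate_columns dict)

-- ===== LEMMAS AND PROOFS =====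

-- ===== VERDICT (by name: the statement is the Claim_ definition above) =====
theorem calculate_columns_spec : Claim_equal_calculate_columns := by
  intro dict _ hpre
  unfold Pre_calculate_columns at hpre
  unfold Spec_calculate_columns calculate_columns calculate_columns_alt
  simp only [PySem.List.foldl_append_if, PySem.List.sum_map_ite_one_zero,
    List.nil_append, List.length_map, List.countP_eq_length_filter.symm,
    PySem.Dict.values, List.countP_map, Function.comp_def] at *
  generalize hg : List.countP (fun x => x.2 != false) (PySem.Dict.ofList dict).items = m at *
  interval_cases m <;> decide
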